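-- pv_equiv track=rewrite | github.com/giob22/neural_network_python | main.py | number_params
-- ===== SOURCE A (Python) =====
-- def number_params(input_size, individuo, output_size):
--     """
--     @brief Calcola il numero totale di parametri (pesi + bias) di un'architettura.
--
--     @param input_size (int) Numero di feature in input.
--     @param individuo (list[tuple[int, any]]) Cromosoma: lista di (n_neuroni, funzione) per ogni hidden layer.
--     @param output_size (int) Numero di neuroni nel layer di output.
--     @return (int) Totale pesi + bias di tutta la rete.
--     """
--     params = 0
--     prev = input_size
--     for neuroni, _ in individuo:
--         params += neuroni * prev + neuroni
--         prev = neuroni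
--     params += output_size * prev + output_size
--     return params
-- ===== SOURCE B (Python) =====
-- def number_params(input_size, individuo, output_size):
--     # Recursive decomposition: a network is its first layer (contributing
--     # n * (input_size + 1) parameters, weights + bias factored together)
--     # followed by the remaining network whose input width is n.
--     if not individuo:
--         return output_size * (input_size + 1)
--     n = individuo[0][0]
--     return n * (input_size + 1) + number_params(n, individuo[1:], output_size)
-- ===== Notes on version B (the rewrite author's own statement) =====
-- stated objective: alternative
-- what changed: Replaces A's iterative loop with a threaded prev/params accumulator pair and a special-cased trailing output term by a structural recursion on the layer list: the base case handles the output layer directly and each step contributes a single factored n*(input+1) term, recursing with the new input width.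
import Mathlib
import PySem

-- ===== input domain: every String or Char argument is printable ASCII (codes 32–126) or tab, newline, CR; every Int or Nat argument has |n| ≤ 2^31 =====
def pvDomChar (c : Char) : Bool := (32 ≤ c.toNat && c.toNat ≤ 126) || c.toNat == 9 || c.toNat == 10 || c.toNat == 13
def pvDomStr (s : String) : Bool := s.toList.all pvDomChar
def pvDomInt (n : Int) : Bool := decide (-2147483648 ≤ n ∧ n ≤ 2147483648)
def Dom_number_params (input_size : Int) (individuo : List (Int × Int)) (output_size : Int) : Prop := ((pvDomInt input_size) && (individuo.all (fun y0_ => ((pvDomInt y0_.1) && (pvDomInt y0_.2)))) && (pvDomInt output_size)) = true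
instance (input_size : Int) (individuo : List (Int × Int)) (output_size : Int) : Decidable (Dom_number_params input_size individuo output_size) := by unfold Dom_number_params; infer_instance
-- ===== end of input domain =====

-- B replaces A's accumulator loop + trailing output term by structural recursion on the layer list (alternative decomposition; return value only).
-- ===== PORT A =====
-- literal transliteration of A: fold threading (params, prev), then the output-layer term
def number_params (input_size : Int) (individuo : List (Int × Int)) (output_size : Int) : Int :=
  let st := individuo.foldl (fun (pp : Int × Int) nf =>
    (pp.1 + nf.1 * pp.2 + nf.1, nf.1)) (0, input_size)
  st.1 + output_size * st.2 + output_size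

-- ===== PORT B =====
-- B: structural recursion; base case = output layer, step = factored n*(input+1) term
def number_params_alt (input_size : Int) (individuo : List (Int × Int)) (output_size : Int) : Int :=
  match individuo with
  | [] => output_size * (input_size + 1)
  | nf :: rest => nf.1 * (input_size + 1) + number_params_alt nf.1 rest output_size

-- ===== PRECONDITION & SPEC =====
def Spec_number_params (input_size : Int) (individuo : List (Int × Int)) (output_size : Int) (out : Int) : Prop := out = number_params_alt input_size individuo output_size
instance (input_size : Int) (individuo : List (Int × Int)) (output_size : Int) (out : Int) : Decidable (Spec_number_params input_size individuo output_size out) := by unfold Spec_number_params; infer_instance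

-- ===== CLAIM =====
def Claim_equal_number_params : Prop := ∀ (input_size : Int) (individuo : List (Int × Int)) (output_size : Int), Dom_number_params input_size individuo output_size → Spec_number_params input_size individuo output_size (number_params input_size individuo output_size)

-- ===== LEMMAS AND PROOFS =====
lemma np_general (individuo : List (Int × Int)) :
    ∀ (p inp outp : Int),
      (let st := individuo.foldl (fun (pp : Int × Int) nf =>
        (pp.1 + nf.1 * pp.2 + nf.1, nf.1)) (p, inp)
       st.1 + outp * st.2 + outp)
      = p + number_params_alt inp individuo outp := by
  induction individuo with
  | nil => intro p inp outp; simp [number_params_alt]; ring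
  | cons h t ih =>
      intro p inp outp
      simp only [List.foldl, number_params_alt]
      rw [ih (p + h.1 * inp + h.1) h.1 outp]
      ring

-- ===== VERDICT =====
theorem number_params_spec : Claim_equal_number_params := by
  intro inp ind outp _
  unfold Spec_number_params number_params
  have := np_general ind 0 inp outp
  simpa using this
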